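-- pv_equiv track=rewrite | github.com/GSYBD/SXLNLP | 刘粤龙/week4/forward_segmentation_full_cut.py | full_cut
-- ===== SOURCE A (Python) =====
-- def full_cut(string, word_freq_dict, prefix_dict):
--     """
--     对输入字符串进行全切分，并计算每种切分方式的得分
--     :param string: 输入字符串
--     :param word_freq_dict: 词频词典
--     :param prefix_dict: 前缀词典
--     :return: 所有切分结果及其得分，得分最高的切分结果，最高得分
--     """
--     result = []
--     n = len(string)
--     dp = [[] for _ in range(n + 1)]
--     dp[0] = [([], 0)]  # (切分结果，得分)
--
--     for i in range(n):
--         if dp[i]: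
--             for j in range(i + 1, n + 1):
--                 word = string[i:j]
--                 if word in prefix_dict:
--                     word_score = word_freq_dict.get(word, 1)  # 如果词不在词频词典中，默认得分为1
--                     for split_list, score in dp[i]:
--                         dp[j].append((split_list + [word], score + word_score))
--                 else:
--                     word_score = 1
--                     for split_list, score in dp[i]:
--                         dp[j].append((split_list + [word], score + word_score))
--
--     for split_list, score in dp[n]:
--         result.append((split_list, score))
--
--     if not result:
--         raise ValueError("No segmentation result found. Please check your input string and dictionaries.")
--
--     # 找到得分最高的切分结果
--     best_cut, best_score = max(result, key=lambda x: x[1])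
--     return result, best_cut, best_score
-- ===== SOURCE B (Python) =====
-- def full_cut(string, word_freq_dict, prefix_dict):
--     n = len(string)
--     memo = {0: [([], 0)]}
--
--     def f(i):
--         if i in memo:
--             return memo[i]
--         segs = []
--         for k in range(i):
--             word = string[k:i]
--             word_score = word_freq_dict.get(word, 1) if word in prefix_dict else 1
--             for split_list, score in f(k):
--                 segs.append((split_list + [word], score + word_score))
--         memo[i] = segs
--         return segs
--
--     result = f(n)
--     best_cut, best_score = max(result, key=lambda x: x[1])
--     return result, best_cut, best_score
-- ===== Notes on version B (the rewrite author's own statement) =====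
-- stated objective: alternative
-- what changed: A fills a forward dp table in place, pushing extensions of dp[i] into every later bucket dp[j]; B is a memoized recursion f(i) on the end index that pulls from all split points k < i, with no table of n+1 buckets and no in-place updates.
import Mathlib
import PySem

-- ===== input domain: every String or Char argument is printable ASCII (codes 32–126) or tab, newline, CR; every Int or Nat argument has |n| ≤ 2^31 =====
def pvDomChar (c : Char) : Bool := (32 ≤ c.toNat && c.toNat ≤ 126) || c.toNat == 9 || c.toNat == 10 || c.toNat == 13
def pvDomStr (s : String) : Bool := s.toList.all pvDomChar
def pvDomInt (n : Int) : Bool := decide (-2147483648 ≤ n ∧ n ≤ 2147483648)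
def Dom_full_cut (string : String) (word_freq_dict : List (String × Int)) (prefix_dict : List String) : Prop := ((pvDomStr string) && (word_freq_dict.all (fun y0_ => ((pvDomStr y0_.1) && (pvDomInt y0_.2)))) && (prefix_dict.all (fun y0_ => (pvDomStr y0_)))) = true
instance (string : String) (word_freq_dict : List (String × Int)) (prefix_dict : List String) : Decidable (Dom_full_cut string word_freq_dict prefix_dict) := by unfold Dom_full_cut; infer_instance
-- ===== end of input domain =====

-- B replaces A's forward-pushing DP table (dp[j] extended while scanning i) by a
-- memoized recursion on the end index pulling from all split points; same results,
-- same order, same best cut (objective: alternative decomposition, not faster).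

-- ===== PORT A =====
-- literal transliteration of A: dp table of n+1 buckets, outer loop over i,
-- inner loop over j pushing dp[i]-extensions into dp[j]; the 'for …: dp[j].append(…)'
-- loop over dp[i] is written as appending the map over dp[i] (same list, same order).
-- Python's dead 'raise ValueError' branch (dp[n] is provably never empty) is the
-- unreachable 'none' match arm.
def full_cut (string : String) (word_freq_dict : List (String × Int)) (prefix_dict : List String) : (List (List String × Int)) × List String × Int :=
  let n : Int := PySem.Str.len string
  let dp0 : List (List (List String × Int)) := (PySem.List.pyRange 0 (n + 1) 1).map (fun _ => [])
  let dp0 := PySem.List.pySetD dp0 0 [([], 0)]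
  let dp := (PySem.List.pyRange 0 n 1).foldl (fun dp i =>
      if PySem.List.pyGetD dp i [] ≠ [] then
        (PySem.List.pyRange (i + 1) (n + 1) 1).foldl (fun dp j =>
          let word := PySem.Str.slice string (some i) (some j)
          if word ∈ prefix_dict then
            let word_score := PySem.Dict.getD (PySem.Dict.mk word_freq_dict) word 1
            PySem.List.pySetD dp j (PySem.List.pyGetD dp j [] ++
              (PySem.List.pyGetD dp i []).map (fun p => (p.1 ++ [word], p.2 + word_score)))
          else
            let word_score : Int := 1
            PySem.List.pySetD dp j (PySem.List.pyGetD dp j [] ++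
              (PySem.List.pyGetD dp i []).map (fun p => (p.1 ++ [word], p.2 + word_score)))) dp
      else dp) dp0
  let result := PySem.List.pyGetD dp n []
  match PySem.List.max? result (fun x => x.2) with
  | some (best_cut, best_score) => (result, best_cut, best_score)
  | none => (result, [], 0)

-- ===== PORT B =====
-- literal transliteration of B's memoized recursion f: f 0 = [([],0)]; f i collects,
-- for each split point k < i in ascending order, the extensions of f k by string[k:i].
-- (The memo dict only caches calls; it does not change any computed value, so the
-- port is the plain recursion.)
def full_cut_altF (string : String) (word_freq_dict : List (String × Int)) (prefix_dict : List String) : (i : Nat) → List (List String × Int)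
  | 0 => [([], 0)]
  | i + 1 =>
    (List.range (i + 1)).attach.foldl (fun segs k =>
      let word := PySem.Str.slice string (some (k.1 : Int)) (some ((i + 1 : Nat) : Int))
      let word_score : Int := if word ∈ prefix_dict then PySem.Dict.getD (PySem.Dict.mk word_freq_dict) word 1 else 1
      segs ++ (full_cut_altF string word_freq_dict prefix_dict k.1).map
        (fun p => (p.1 ++ [word], p.2 + word_score))) []
  termination_by i => i
  decreasing_by exact List.mem_range.mp k.2

def full_cut_alt (string : String) (word_freq_dict : List (String × Int)) (prefix_dict : List String) : (List (List String × Int)) × List String × Int :=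
  let result := full_cut_altF string word_freq_dict prefix_dict string.toList.length
  match PySem.List.max? result (fun x => x.2) with
  | some (best_cut, best_score) => (result, best_cut, best_score)
  | none => (result, [], 0)

-- ===== PRECONDITION & SPEC =====
def Spec_full_cut (string : String) (word_freq_dict : List (String × Int)) (prefix_dict : List String) (out : (List (List String × Int)) × List String × Int) : Prop := out = full_cut_alt string word_freq_dict prefix_dict
instance (string : String) (word_freq_dict : List (String × Int)) (prefix_dict : List String) (out : (List (List String × Int)) × List String × Int) : Decidable (Spec_full_cut string word_freq_dict prefix_dict out) := by unfold Spec_full_cut; infer_instance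

-- ===== CLAIM (what is proved, stated in full; the proofs are below) =====
def Claim_equal_full_cut : Prop := ∀ (string : String) (word_freq_dict : List (String × Int)) (prefix_dict : List String), Dom_full_cut string word_freq_dict prefix_dict → Spec_full_cut string word_freq_dict prefix_dict (full_cut string word_freq_dict prefix_dict)

-- ===== LEMMAS AND PROOFS =====

-- the extension of one partial segmentation by the word string[k:j]
def pvExt (string : String) (word_freq_dict : List (String × Int)) (prefix_dict : List String) (k j : Nat) : List String × Int → List String × Int :=
  fun p =>
    let word := PySem.Str.slice string (some (k : Int)) (some (j : Int))
    (p.1 ++ [word], p.2 + (if word ∈ prefix_dict then PySem.Dict.getD (PySem.Dict.mk word_freq_dict) word 1 else 1))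

theorem pv_attach_flatMap {α β : Type} (l : List α) (g : α → List β) :
    (l.attach.flatMap fun x => g x.1) = l.flatMap g := by
  simp only [List.flatMap_def]
  rw [List.attach_map_val]

-- Ptab i j = the contents of dp[j] after the outer loop has processed i iterations
def Ptab (string : String) (w : List (String × Int)) (pd : List String) (i j : Nat) : List (List String × Int) :=
  (if j = 0 then [([], 0)] else []) ++
    (List.range (min i j)).flatMap (fun k =>
      (full_cut_altF string w pd k).map (pvExt string w pd k j))

theorem altF_eq_Ptab (string : String) (w : List (String × Int)) (pd : List String) (i : Nat) :
    full_cut_altF string w pd i = Ptab string w pd i i := by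
  cases i with
  | zero => simp [full_cut_altF, Ptab]
  | succ i =>
    rw [full_cut_altF]
    simp only [PySem.List.foldl_append_eq_flatMap]
    rw [pv_attach_flatMap _ (fun (k : Nat) =>
      List.map
        (fun p =>
          ((p.1 ++ [PySem.Str.slice string (some (k : Int)) (some ((i + 1 : Nat) : Int))],
            p.2 +
              if PySem.Str.slice string (some (k : Int)) (some ((i + 1 : Nat) : Int)) ∈ pd then
                PySem.Dict.getD (PySem.Dict.mk w) (PySem.Str.slice string (some (k : Int)) (some ((i + 1 : Nat) : Int))) 1
              else 1) : List String × Int))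
        (full_cut_altF string w pd k))]
    simp only [Ptab, List.nil_append, Nat.min_self]
    push_cast
    rfl

theorem altF_ne_nil (string : String) (w : List (String × Int)) (pd : List String) (i : Nat) :
    full_cut_altF string w pd i ≠ [] := by
  cases i with
  | zero => simp [full_cut_altF]
  | succ i =>
    rw [full_cut_altF]
    simp only [PySem.List.foldl_append_eq_flatMap]
    intro h
    simp only [List.nil_append, List.flatMap_eq_nil_iff, List.map_eq_nil_iff] at h
    have := h ⟨0, by simp⟩ (List.mem_attach _ _)
    simp [full_cut_altF] at this

theorem Ptab_stable (string : String) (w : List (String × Int)) (pd : List String) {i j : Nat} (h : j ≤ i) :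
    Ptab string w pd i j = Ptab string w pd j j := by
  simp [Ptab, Nat.min_eq_right h]

theorem Ptab_succ (string : String) (w : List (String × Int)) (pd : List String) {i j : Nat} (h : i < j) :
    Ptab string w pd (i + 1) j =
      Ptab string w pd i j ++ (full_cut_altF string w pd i).map (pvExt string w pd i j) := by
  have h1 : min (i + 1) j = i + 1 := by omega
  have h2 : min i j = i := by omega
  simp [Ptab, h1, h2, List.range_succ]

theorem pv_getD_set {α : Type} (l : List α) (i j : Nat) (a d : α) :
    (l.set i a).getD j d = if i = j ∧ i < l.length then a else l.getD j d := by
  simp only [List.getD_eq_getElem?_getD, List.getElem?_set]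
  rcases eq_or_ne i j with rfl | hij
  · by_cases hl : i < l.length
    · simp [hl]
    · simp [hl]
  · simp [hij]

theorem pv_foldl_pyRange_inv {σ : Type} (f : σ → Int → σ) (a n : Nat) (Q : Nat → σ → Prop)
    (hstep : ∀ (i : Nat) (s : σ), a ≤ i → i < n → Q i s → Q (i + 1) (f s (i : Int)))
    (han : a ≤ n) :
    ∀ (s : σ), Q a s → Q n ((PySem.List.pyRange (a : Int) (n : Int) 1).foldl f s) := by
  have key : ∀ (d b : Nat) (s : σ), a ≤ b → b ≤ n → n - b = d → Q b s →
      Q n ((PySem.List.pyRange (b : Int) (n : Int) 1).foldl f s) := by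
    intro d
    induction d with
    | zero =>
      intro b s hab hbn hd hQ
      have hbe : b = n := by omega
      subst hbe
      rw [PySem.List.pyRange_one_eq_nil (le_refl _)]
      exact hQ
    | succ d ih =>
      intro b s hab hbn hd hQ
      have hlt : b < n := by omega
      rw [PySem.List.pyRange_one_cons (by exact_mod_cast hlt)]
      simp only [List.foldl_cons]
      have hc : ((b : Int) + 1) = ((b + 1 : Nat) : Int) := by push_cast; ring
      rw [hc]
      exact ih (b + 1) (f s (b : Int)) (by omega) (by omega) (by omega) (hstep b s hab hlt hQ)
  intro s hQ
  exact key (n - a) a s (le_refl _) han rfl hQ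

-- dp-table invariants: pvQO i dp — dp after i outer iterations; pvQI m dp — dp midway
-- through outer iteration iN, inner index about to be m
def pvQO (string : String) (w : List (String × Int)) (pd : List String) (nN i : Nat) (dp : List (List (List String × Int))) : Prop :=
  dp.length = nN + 1 ∧ ∀ j ≤ nN, dp.getD j [] = Ptab string w pd i j

def pvQI (string : String) (w : List (String × Int)) (pd : List String) (nN iN m : Nat) (dp : List (List (List String × Int))) : Prop :=
  dp.length = nN + 1 ∧ ∀ j ≤ nN, dp.getD j [] =
    if j < m then Ptab string w pd (iN + 1) j else Ptab string w pd iN j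

theorem pv_inner_step (string : String) (w : List (String × Int)) (pd : List String)
    (nN iN m : Nat) (dp : List (List (List String × Int)))
    (h1 : iN + 1 ≤ m) (h2 : m < nN + 1) (hQ : pvQI string w pd nN iN m dp) :
    pvQI string w pd nN iN (m + 1)
      (if PySem.Str.slice string (some (iN : Int)) (some (m : Int)) ∈ pd then
        PySem.List.pySetD dp (m : Int)
          (PySem.List.pyGetD dp (m : Int) [] ++
            List.map
              (fun p =>
                (p.1 ++ [PySem.Str.slice string (some (iN : Int)) (some (m : Int))],
                  p.2 + PySem.Dict.getD (PySem.Dict.mk w) (PySem.Str.slice string (some (iN : Int)) (some (m : Int))) 1))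
              (PySem.List.pyGetD dp (iN : Int) []))
      else
        PySem.List.pySetD dp (m : Int)
          (PySem.List.pyGetD dp (m : Int) [] ++
            List.map (fun p => (p.1 ++ [PySem.Str.slice string (some (iN : Int)) (some (m : Int))], p.2 + 1))
              (PySem.List.pyGetD dp (iN : Int) []))) := by
  obtain ⟨hlen, hvals⟩ := hQ
  have hset : (if PySem.Str.slice string (some (iN : Int)) (some (m : Int)) ∈ pd then
        PySem.List.pySetD dp (m : Int)
          (PySem.List.pyGetD dp (m : Int) [] ++
            List.map
              (fun p =>
                (p.1 ++ [PySem.Str.slice string (some (iN : Int)) (some (m : Int))],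
                  p.2 + PySem.Dict.getD (PySem.Dict.mk w) (PySem.Str.slice string (some (iN : Int)) (some (m : Int))) 1))
              (PySem.List.pyGetD dp (iN : Int) []))
      else
        PySem.List.pySetD dp (m : Int)
          (PySem.List.pyGetD dp (m : Int) [] ++
            List.map (fun p => (p.1 ++ [PySem.Str.slice string (some (iN : Int)) (some (m : Int))], p.2 + 1))
              (PySem.List.pyGetD dp (iN : Int) [])))
      = dp.set m (dp.getD m [] ++ (dp.getD iN []).map (pvExt string w pd iN m)) := by
    delta pvExt
    simp only [PySem.List.pyGetD_natCast, PySem.List.pySetD_natCast]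
    split_ifs <;> simp
  rw [hset]
  have hgm : dp.getD m [] = Ptab string w pd iN m := by
    rw [hvals m (by omega)]
    simp
  have hgi : dp.getD iN [] = full_cut_altF string w pd iN := by
    rw [hvals iN (by omega), if_pos (by omega)]
    rw [Ptab_stable string w pd (Nat.le_succ iN), ← altF_eq_Ptab]
  constructor
  · simp [List.length_set, hlen]
  · intro j hj
    rw [pv_getD_set]
    rcases eq_or_ne m j with rfl | hmj
    · rw [if_pos ⟨rfl, by omega⟩, if_pos (by omega), hgm, hgi,
        ← Ptab_succ string w pd (by omega : iN < m)]
    · rw [if_neg (by tauto), hvals j hj]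
      rcases Nat.lt_or_ge j m with hlt | hge
      · rw [if_pos hlt, if_pos (by omega)]
      · rw [if_neg (by omega), if_neg (by omega)]

theorem pv_outer_step (string : String) (w : List (String × Int)) (pd : List String)
    (nN iN : Nat) (dp : List (List (List String × Int)))
    (hi : iN < nN) (hQ : pvQO string w pd nN iN dp) :
    pvQO string w pd nN (iN + 1)
      (if PySem.List.pyGetD dp (iN : Int) [] ≠ [] then
        List.foldl
          (fun dp j =>
            if PySem.Str.slice string (some (iN : Int)) (some j) ∈ pd then
              PySem.List.pySetD dp j
                (PySem.List.pyGetD dp j [] ++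
                  List.map
                    (fun p =>
                      (p.1 ++ [PySem.Str.slice string (some (iN : Int)) (some j)],
                        p.2 + PySem.Dict.getD (PySem.Dict.mk w) (PySem.Str.slice string (some (iN : Int)) (some j)) 1))
                    (PySem.List.pyGetD dp (iN : Int) []))
            else
              PySem.List.pySetD dp j
                (PySem.List.pyGetD dp j [] ++
                  List.map (fun p => (p.1 ++ [PySem.Str.slice string (some (iN : Int)) (some j)], p.2 + 1))
                    (PySem.List.pyGetD dp (iN : Int) [])))
          dp (PySem.List.pyRange ((iN : Int) + 1) ((nN : Int) + 1) 1)
      else dp) := by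
  obtain ⟨hlen, hvals⟩ := hQ
  rw [if_pos (by
    rw [PySem.List.pyGetD_natCast, hvals iN (by omega), ← altF_eq_Ptab]
    exact altF_ne_nil string w pd iN)]
  have hc1 : ((iN : Int) + 1) = ((iN + 1 : Nat) : Int) := by push_cast; ring
  have hc2 : ((nN : Int) + 1) = ((nN + 1 : Nat) : Int) := by push_cast; ring
  rw [hc1, hc2]
  have hfold := pv_foldl_pyRange_inv
    (fun dp j =>
      if PySem.Str.slice string (some (iN : Int)) (some j) ∈ pd then
        PySem.List.pySetD dp j
          (PySem.List.pyGetD dp j [] ++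
            List.map
              (fun p =>
                (p.1 ++ [PySem.Str.slice string (some (iN : Int)) (some j)],
                  p.2 + PySem.Dict.getD (PySem.Dict.mk w) (PySem.Str.slice string (some (iN : Int)) (some j)) 1))
              (PySem.List.pyGetD dp (iN : Int) []))
      else
        PySem.List.pySetD dp j
          (PySem.List.pyGetD dp j [] ++
            List.map (fun p => (p.1 ++ [PySem.Str.slice string (some (iN : Int)) (some j)], p.2 + 1))
              (PySem.List.pyGetD dp (iN : Int) [])))
    (iN + 1) (nN + 1) (pvQI string w pd nN iN)
    (fun m s h1 h2 hQ => pv_inner_step string w pd nN iN m s h1 h2 hQ)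
    (by omega) dp
    (by
      refine ⟨hlen, fun j hj => ?_⟩
      rw [hvals j hj]
      rcases Nat.lt_or_ge j (iN + 1) with hlt | hge
      · rw [if_pos hlt, Ptab_stable string w pd (by omega : j ≤ iN + 1),
          ← Ptab_stable string w pd (by omega : j ≤ iN)]
      · rw [if_neg (by omega)])
  obtain ⟨hlen', hvals'⟩ := hfold
  exact ⟨hlen', fun j hj => by rw [hvals' j hj, if_pos (by omega)]⟩

theorem pv_getD_map_const {α β : Type} (l : List α) (j : Nat) (c : β) :
    (l.map (fun _ => c)).getD j c = c := by
  simp only [List.getD_eq_getElem?_getD, List.getElem?_map]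
  cases l[j]? <;> simp

theorem pv_dp0 (string : String) (w : List (String × Int)) (pd : List String) (nN : Nat) :
    pvQO string w pd nN 0
      (PySem.List.pySetD ((PySem.List.pyRange 0 ((nN : Int) + 1) 1).map (fun _ => [])) 0 [([], 0)]) := by
  rw [PySem.List.pySetD_of_nonneg _ _ (by norm_num)]
  have hlen : ((PySem.List.pyRange 0 ((nN : Int) + 1) 1).map
      (fun (_ : Int) => ([] : List (List String × Int)))).length = nN + 1 := by
    rw [List.length_map, PySem.List.length_pyRange_one]
    omega
  constructor
  · simp [List.length_set]
  · intro j hj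
    rw [show ((0 : Int).toNat) = 0 from rfl, pv_getD_set]
    rcases eq_or_ne j 0 with rfl | hj0
    · rw [if_pos ⟨rfl, by omega⟩]
      simp [Ptab]
    · rw [if_neg (by tauto), pv_getD_map_const]
      simp [Ptab, hj0]

theorem pv_result_eq (string : String) (w : List (String × Int)) (pd : List String) :
    PySem.List.pyGetD
      (List.foldl
        (fun dp i =>
          if PySem.List.pyGetD dp i [] ≠ [] then
            List.foldl
              (fun dp j =>
                if PySem.Str.slice string (some i) (some j) ∈ pd then
                  PySem.List.pySetD dp j
                    (PySem.List.pyGetD dp j [] ++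
                      List.map
                        (fun p =>
                          (p.1 ++ [PySem.Str.slice string (some i) (some j)],
                            p.2 + PySem.Dict.getD (PySem.Dict.mk w) (PySem.Str.slice string (some i) (some j)) 1))
                        (PySem.List.pyGetD dp i []))
                else
                  PySem.List.pySetD dp j
                    (PySem.List.pyGetD dp j [] ++
                      List.map (fun p => (p.1 ++ [PySem.Str.slice string (some i) (some j)], p.2 + 1))
                        (PySem.List.pyGetD dp i [])))
              dp (PySem.List.pyRange (i + 1) ((string.toList.length : Int) + 1) 1)
          else dp)
        (PySem.List.pySetD ((PySem.List.pyRange 0 ((string.toList.length : Int) + 1) 1).map (fun _ => [])) 0 [([], 0)])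
        (PySem.List.pyRange 0 (string.toList.length : Int) 1))
      (string.toList.length : Int) [] = full_cut_altF string w pd string.toList.length := by
  have h0 : ((0 : Nat) : Int) = 0 := by norm_cast
  have hfold := pv_foldl_pyRange_inv
    (fun dp i =>
      if PySem.List.pyGetD dp i [] ≠ [] then
        List.foldl
          (fun dp j =>
            if PySem.Str.slice string (some i) (some j) ∈ pd then
              PySem.List.pySetD dp j
                (PySem.List.pyGetD dp j [] ++
                  List.map
                    (fun p =>
                      (p.1 ++ [PySem.Str.slice string (some i) (some j)],
                        p.2 + PySem.Dict.getD (PySem.Dict.mk w) (PySem.Str.slice string (some i) (some j)) 1))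
                    (PySem.List.pyGetD dp i []))
            else
              PySem.List.pySetD dp j
                (PySem.List.pyGetD dp j [] ++
                  List.map (fun p => (p.1 ++ [PySem.Str.slice string (some i) (some j)], p.2 + 1))
                    (PySem.List.pyGetD dp i [])))
          dp (PySem.List.pyRange (i + 1) ((string.toList.length : Int) + 1) 1)
      else dp)
    0 string.toList.length (pvQO string w pd string.toList.length)
    (fun i s _ hi hQ => pv_outer_step string w pd string.toList.length i s hi hQ)
    (Nat.zero_le _)
    (PySem.List.pySetD ((PySem.List.pyRange 0 ((string.toList.length : Int) + 1) 1).map (fun _ => [])) 0 [([], 0)])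
    (pv_dp0 string w pd string.toList.length)
  rw [h0] at hfold
  rw [PySem.List.pyGetD_natCast, hfold.2 string.toList.length (le_refl _), ← altF_eq_Ptab]

-- ===== VERDICT (by name: the statement is the Claim_ definition above) =====
theorem full_cut_spec : Claim_equal_full_cut := by
  intro string w pd _
  unfold Spec_full_cut
  conv_lhs => unfold full_cut
  simp only [PySem.Str.len_eq]
  rw [pv_result_eq string w pd]
  rfl
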